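-- pv_equiv track=rewrite | github.com/techjoec/DriftBuster | src/driftbuster/formats/json/plugin.py | _contains_comments
-- ===== SOURCE A (Python) =====
-- def _contains_comments(text: str) -> bool:
--     in_string = False
--     escape = False
--     i = 0
--     length = len(text)
--     while i < length:
--         char = text[i]
--         if in_string:
--             if escape:
--                 escape = False
--             elif char == "\\":
--                 escape = True
--             elif char == '"':
--                 in_string = False
--             i += 1
--             continue
--         if char == '"':
--             in_string = True
--             i += 1
--             continue
--         if char == "/" and i + 1 < length:
--             nxt = text[i + 1]
--             if nxt in {"/", "*"}:
--                 return True
--         i += 1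
--     return False
-- ===== SOURCE B (Python) =====
-- def _contains_comments(text: str) -> bool:
--     # Pass 1: blank out JSON string literals (each becomes a single space),
--     # honouring backslash escapes; an unterminated string runs to end-of-text.
--     out = []
--     it = iter(text)
--     for ch in it:
--         if ch == '"':
--             out.append(' ')
--             for c in it:
--                 if c == '\\':
--                     next(it, None)
--                 elif c == '"':
--                     break
--         else:
--             out.append(ch)
--     stripped = ''.join(out)
--     # Pass 2: plain substring searches on the comment-marker candidates.
--     return '//' in stripped or '/*' in stripped
-- ===== Notes on version B (the rewrite author's own statement) =====
-- stated objective: simpler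
-- what changed: Replaced the single-pass in_string/escape index state machine by two passes: first blank out every JSON string literal (each becomes one space, escapes honoured, unterminated strings run to end-of-text), then plain substring searches for the line-comment and block-comment openers.
import Mathlib
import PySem

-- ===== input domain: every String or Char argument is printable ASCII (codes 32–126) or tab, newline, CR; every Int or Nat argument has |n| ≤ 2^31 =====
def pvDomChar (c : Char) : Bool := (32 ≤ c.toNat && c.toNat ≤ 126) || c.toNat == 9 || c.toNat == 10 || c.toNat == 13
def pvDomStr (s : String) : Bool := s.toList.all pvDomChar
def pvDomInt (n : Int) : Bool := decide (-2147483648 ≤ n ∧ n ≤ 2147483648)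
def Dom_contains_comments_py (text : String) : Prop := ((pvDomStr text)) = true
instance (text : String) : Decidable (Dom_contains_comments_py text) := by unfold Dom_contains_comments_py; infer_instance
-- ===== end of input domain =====

-- B replaces A's single-pass in_string/escape state machine by two passes: blank out the
-- string literals, then plain substring searches for the two comment openers (objective: simpler).

-- ===== PORT A =====
-- A's while loop over the index, as structural recursion over the character list
-- carrying the same (in_string, escape) state; text[i+1] lookahead = pattern on the tail.
def pvLoopA (l : List Char) (inStr esc : Bool) : Bool :=
  match l with
  | [] => false
  | c :: rest =>
    if inStr then
      if esc then pvLoopA rest inStr false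
      else if c = '\\' then pvLoopA rest inStr true
      else if c = '"' then pvLoopA rest false esc
      else pvLoopA rest inStr esc
    else if c = '"' then pvLoopA rest true esc
    else if c = '/' then
      match rest with
      | nxt :: _ => if nxt = '/' ∨ nxt = '*' then true else pvLoopA rest inStr esc
      | [] => pvLoopA rest inStr esc
    else pvLoopA rest inStr esc

def contains_comments_py (text : String) : Bool := pvLoopA text.toList false false

-- ===== PORT B =====
-- Pass 1 of Source B: copy chars, but replace each string literal ('"' … escape pairs … '"',
-- or running to end-of-text) by a single space.
mutual
def pvStrip : List Char → List Char
  | [] => []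
  | c :: r => if c = '"' then ' ' :: pvSkipStr r else c :: pvStrip r
def pvSkipStr : List Char → List Char
  | [] => []
  | c :: r => if c = '\\' then pvSkipEsc r else if c = '"' then pvStrip r else pvSkipStr r
def pvSkipEsc : List Char → List Char
  | [] => []
  | _ :: r => pvSkipStr r
end

-- Pass 2 of Source B: Python's `sub in s` substring test for a two-character pattern.
def pvHasSub (a b : Char) : List Char → Bool
  | x :: y :: r => if x = a ∧ y = b then true else pvHasSub a b (y :: r)
  | _ => false

def contains_comments_py_alt (text : String) : Bool :=
  let stripped := pvStrip text.toList
  pvHasSub '/' '/' stripped || pvHasSub '/' '*' stripped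

-- ===== PRECONDITION & SPEC =====
def Spec_contains_comments_py (text : String) (out : Bool) : Prop := out = contains_comments_py_alt text
instance (text : String) (out : Bool) : Decidable (Spec_contains_comments_py text out) := by unfold Spec_contains_comments_py; infer_instance

-- ===== CLAIM (what is proved, stated in full; the proofs are below) =====
def Claim_equal_contains_comments_py : Prop := ∀ (text : String), Dom_contains_comments_py text → Spec_contains_comments_py text (contains_comments_py text)

-- ===== LEMMAS AND PROOFS =====

-- "stripped contains // or /*" as one scan, to mediate between the two ports.
def pvHasMarker : List Char → Bool
  | c :: d :: r => if c = '/' ∧ (d = '/' ∨ d = '*') then true else pvHasMarker (d :: r)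
  | _ => false

lemma pvHasSub_eq_marker : ∀ l : List Char,
    (pvHasSub '/' '/' l || pvHasSub '/' '*' l) = pvHasMarker l := by
  intro l
  induction l with
  | nil => simp [pvHasSub, pvHasMarker]
  | cons x t ih =>
    cases t with
    | nil => simp [pvHasSub, pvHasMarker]
    | cons y r =>
      simp only [pvHasSub, pvHasMarker] at *
      split_ifs <;> simp_all

lemma pvMarker_cons_ne {c : Char} (h : c ≠ '/') (x : List Char) :
    pvHasMarker (c :: x) = pvHasMarker x := by
  cases x <;> simp [pvHasMarker, h]

lemma pvMarker_slash {d : Char} (h1 : d ≠ '/') (h2 : d ≠ '*') (t : List Char) :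
    pvHasMarker ('/' :: d :: t) = pvHasMarker (d :: t) := by
  simp [pvHasMarker, h1, h2]

lemma pvMain : ∀ (n : Nat) (l : List Char), l.length ≤ n →
    (pvLoopA l false false = pvHasMarker (pvStrip l)) ∧
    (pvLoopA l true false = pvHasMarker (pvSkipStr l)) ∧
    (pvLoopA l true true = pvHasMarker (pvSkipEsc l)) := by
  intro n
  induction n with
  | zero =>
    intro l h
    have : l = [] := List.eq_nil_of_length_eq_zero (Nat.le_zero.mp h)
    subst this
    simp [pvLoopA, pvStrip, pvSkipStr, pvSkipEsc, pvHasMarker]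
  | succ n ih =>
    intro l h
    cases l with
    | nil => simp [pvLoopA, pvStrip, pvSkipStr, pvSkipEsc, pvHasMarker]
    | cons c r =>
      have hr : r.length ≤ n := by simpa using Nat.succ_le_succ_iff.mp h
      refine ⟨?_, ?_, ?_⟩
      · -- not in string
        by_cases hq : c = '"'
        · subst hq
          rw [show pvLoopA ('"' :: r) false false = pvLoopA r true false from by
                simp [pvLoopA],
              show pvStrip ('"' :: r) = ' ' :: pvSkipStr r from by simp [pvStrip],
              pvMarker_cons_ne (by decide)]
          exact (ih r hr).2.1
        · by_cases hs : c = '/'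
          · subst hs
            cases r with
            | nil => simp [pvLoopA, pvStrip, pvHasMarker]
            | cons d r2 =>
              by_cases hd : d = '/' ∨ d = '*'
              · rw [show pvLoopA ('/' :: d :: r2) false false = true from by
                      simp [pvLoopA, hd]]
                rcases hd with h' | h' <;> subst h' <;>
                  simp [pvStrip, pvHasMarker]
              · rw [not_or] at hd
                rw [show pvLoopA ('/' :: d :: r2) false false =
                      pvLoopA (d :: r2) false false from by
                      simp [pvLoopA, hd.1, hd.2],
                    (ih (d :: r2) hr).1,
                    show pvStrip ('/' :: d :: r2) = '/' :: pvStrip (d :: r2) from by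
                      simp [pvStrip]]
                by_cases hq2 : d = '"'
                · subst hq2
                  rw [show pvStrip ('"' :: r2) = ' ' :: pvSkipStr r2 from by
                        simp [pvStrip],
                      pvMarker_slash (by decide) (by decide)]
                · rw [show pvStrip (d :: r2) = d :: pvStrip r2 from by
                        simp [pvStrip, hq2],
                      pvMarker_slash hd.1 hd.2]
          · rw [show pvLoopA (c :: r) false false = pvLoopA r false false from by
                  cases r <;> simp [pvLoopA, hq, hs],
                (ih r hr).1,
                show pvStrip (c :: r) = c :: pvStrip r from by simp [pvStrip, hq],
                pvMarker_cons_ne hs]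
      · -- in string, no pending escape
        by_cases hb : c = '\\'
        · subst hb
          rw [show pvLoopA ('\\' :: r) true false = pvLoopA r true true from by
                simp [pvLoopA],
              show pvSkipStr ('\\' :: r) = pvSkipEsc r from by simp [pvSkipStr]]
          exact (ih r hr).2.2
        · by_cases hq : c = '"'
          · subst hq
            rw [show pvLoopA ('"' :: r) true false = pvLoopA r false false from by
                  simp [pvLoopA],
                show pvSkipStr ('"' :: r) = pvStrip r from by simp [pvSkipStr]]
            exact (ih r hr).1
          · rw [show pvLoopA (c :: r) true false = pvLoopA r true false from by
                  simp [pvLoopA, hb, hq],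
                show pvSkipStr (c :: r) = pvSkipStr r from by simp [pvSkipStr, hb, hq]]
            exact (ih r hr).2.1
      · -- in string, pending escape: the char is consumed unconditionally
        rw [show pvLoopA (c :: r) true true = pvLoopA r true false from by
              simp [pvLoopA],
            show pvSkipEsc (c :: r) = pvSkipStr r from rfl]
        exact (ih r hr).2.1

-- ===== VERDICT (by name: the statement is the Claim_ definition above) =====
theorem contains_comments_py_spec : Claim_equal_contains_comments_py := by
  intro text _
  unfold Spec_contains_comments_py contains_comments_py contains_comments_py_alt
  rw [pvHasSub_eq_marker]
  exact (pvMain text.toList.length text.toList le_rfl).1
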